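-- pv_equiv track=rewrite | github.com/surajrdy/VLSI-CAD | VLSI/PA1/UnateRecursiveComplement/main.py | BinateVariable
-- ===== SOURCE A (Python) =====
-- TRUE = '01'
--
-- FALSE = '10'
--
-- def BinateVariable(function, nvars, ncubes):
--     true_count = [0] * nvars
--     neg_count = [0] * nvars
--     binate_list = [False] * nvars
--     binate = False
--
--     for x in range(ncubes):
--         for y in range(nvars):
--             if function[x][y] == TRUE:
--                 true_count[y] += 1
--             elif function[x][y] == FALSE:
--                 neg_count[y] += 1
--
--     for y in range(nvars):
--         if true_count[y] > 0 and neg_count[y] > 0: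
--             binate_list[y] = True
--             binate = True
--     return true_count, neg_count, binate_list, binate
-- ===== SOURCE B (Python) =====
-- TRUE = '01'
--
-- FALSE = '10'
--
-- def BinateVariable(function, nvars, ncubes):
--     # Column-wise: for each variable, stream its column across all cubes and
--     # tally with two count scans; classify binate in the same pass.
--     true_count = []
--     neg_count = []
--     binate_list = []
--     for y in range(nvars):
--         column = [function[x][y] for x in range(ncubes)]
--         t = column.count(TRUE)
--         f = column.count(FALSE)
--         true_count.append(t)
--         neg_count.append(f)
--         binate_list.append(t > 0 and f > 0)
--     return true_count, neg_count, binate_list, any(binate_list)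
-- ===== Notes on version B (the rewrite author's own statement) =====
-- stated objective: simpler
-- what changed: Transposed the traversal: instead of a row-wise double loop incrementing per-variable accumulator arrays plus a second classification pass, B iterates variables once, streams each variable's column across the cubes and tallies it with two count scans, classifying binate in the same pass.
import Mathlib
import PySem

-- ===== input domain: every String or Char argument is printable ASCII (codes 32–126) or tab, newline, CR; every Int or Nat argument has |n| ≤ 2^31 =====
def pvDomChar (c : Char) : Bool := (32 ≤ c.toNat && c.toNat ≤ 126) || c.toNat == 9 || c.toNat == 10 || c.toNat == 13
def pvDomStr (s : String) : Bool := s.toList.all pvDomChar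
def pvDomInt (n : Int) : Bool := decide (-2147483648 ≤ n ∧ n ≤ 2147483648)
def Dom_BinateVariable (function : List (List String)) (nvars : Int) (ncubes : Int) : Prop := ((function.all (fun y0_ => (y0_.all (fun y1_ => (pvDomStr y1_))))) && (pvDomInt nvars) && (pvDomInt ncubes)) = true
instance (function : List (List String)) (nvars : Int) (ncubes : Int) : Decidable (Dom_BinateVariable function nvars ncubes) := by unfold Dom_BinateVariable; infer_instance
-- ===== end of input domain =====

-- B transposes A's row-wise double loop into a single column-wise pass (count scans per variable,
-- binate classified in the same pass); objective: simpler. Equal return value on all of Pre_.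

-- ===== PORT A =====
def BinateVariable (function : List (List String)) (nvars : Int) (ncubes : Int) : List Int × List Int × List Bool × Bool :=
  let true0 : List Int := List.replicate nvars.toNat 0
  let neg0 : List Int := List.replicate nvars.toNat 0
  let blist0 : List Bool := List.replicate nvars.toNat false
  let counts : List Int × List Int :=
    (PySem.List.pyRange 0 ncubes 1).foldl (fun st x =>
      (PySem.List.pyRange 0 nvars 1).foldl (fun (st2 : List Int × List Int) y =>
        if PySem.List.pyGetD (PySem.List.pyGetD function x []) y "" = "01" then
          (PySem.List.pySetD st2.1 y (PySem.List.pyGetD st2.1 y 0 + 1), st2.2)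
        else if PySem.List.pyGetD (PySem.List.pyGetD function x []) y "" = "10" then
          (st2.1, PySem.List.pySetD st2.2 y (PySem.List.pyGetD st2.2 y 0 + 1))
        else st2) st) (true0, neg0)
  let final : List Bool × Bool :=
    (PySem.List.pyRange 0 nvars 1).foldl (fun (st : List Bool × Bool) y =>
      if PySem.List.pyGetD counts.1 y 0 > 0 ∧ PySem.List.pyGetD counts.2 y 0 > 0 then
        (PySem.List.pySetD st.1 y true, true)
      else st) (blist0, false)
  (counts.1, counts.2, final.1, final.2)

-- ===== PORT B =====
def BinateVariable_alt (function : List (List String)) (nvars : Int) (ncubes : Int) : List Int × List Int × List Bool × Bool :=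
  let rows : List (Int × Int × Bool) :=
    (PySem.List.pyRange 0 nvars 1).map (fun y =>
      let column := (PySem.List.pyRange 0 ncubes 1).map (fun x =>
        PySem.List.pyGetD (PySem.List.pyGetD function x []) y "")
      let t : Int := (PySem.List.count column "01" : Int)
      let f : Int := (PySem.List.count column "10" : Int)
      (t, f, decide (t > 0 ∧ f > 0)))
  (rows.map (·.1), rows.map (·.2.1), rows.map (·.2.2), rows.any (·.2.2))

-- ===== PRECONDITION & SPEC =====
-- Pre_ excludes exactly the inputs on which A raises IndexError: when both loops actually run
-- (0 < nvars and 0 < ncubes), function must have at least ncubes rows each of length ≥ nvars.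
def Pre_BinateVariable (function : List (List String)) (nvars : Int) (ncubes : Int) : Prop :=
  0 < nvars → 0 < ncubes →
    (ncubes ≤ (function.length : Int) ∧
     ∀ row ∈ function.take ncubes.toNat, nvars ≤ (row.length : Int))
instance (function : List (List String)) (nvars : Int) (ncubes : Int) : Decidable (Pre_BinateVariable function nvars ncubes) := by unfold Pre_BinateVariable; infer_instance

def pvWitness_BinateVariable : List (List String) × Int × Int := ([["01", "10"], ["11", "01"]], 2, 2)

def Spec_BinateVariable (function : List (List String)) (nvars : Int) (ncubes : Int) (out : List Int × List Int × List Bool × Bool) : Prop := out = BinateVariable_alt function nvars ncubes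
instance (function : List (List String)) (nvars : Int) (ncubes : Int) (out : List Int × List Int × List Bool × Bool) : Decidable (Spec_BinateVariable function nvars ncubes out) := by unfold Spec_BinateVariable; infer_instance

-- ===== CLAIM (what is proved, stated in full; the proofs are below) =====
def Claim_equal_BinateVariable : Prop := ∀ (function : List (List String)) (nvars : Int) (ncubes : Int), Dom_BinateVariable function nvars ncubes → Pre_BinateVariable function nvars ncubes → Spec_BinateVariable function nvars ncubes (BinateVariable function nvars ncubes)
-- ===== LEMMAS AND PROOFS =====

-- value of the row-x, column-j cell as both ports read it (total pyGetD form)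
def pvGet (f : List (List String)) (x j : Nat) : String :=
  (f.getD x []).getD j ""

lemma pvGet_fold (f : List (List String)) (x j : Nat) :
    (f.getD x []).getD j "" = pvGet f x j := rfl

lemma pv_range0 (m : Int) :
    PySem.List.pyRange 0 m 1 = (List.range m.toNat).map Nat.cast := by
  rw [PySem.List.pyRange_one]; simp only [sub_zero, zero_add]

lemma pv_len {α β : Type} (f : List α → β → List α)
    (h : ∀ a i, (f a i).length = a.length) :
    ∀ (l : List β) (acc : List α), (l.foldl f acc).length = acc.length := by
  intro l
  induction l with
  | nil => intro acc; rfl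
  | cons i l ih => intro acc; rw [List.foldl_cons, ih, h]

lemma pv_incr (p : Nat → Prop) [DecidablePred p] (j : Nat) :
    ∀ (l : List Nat) (acc : List Int), (∀ i ∈ l, i < acc.length) →
      (l.foldl (fun a i => if p i then a.set i (a.getD i 0 + 1) else a) acc).getD j 0
        = acc.getD j 0 + (if p j then (l.count j : Int) else 0) := by
  intro l
  induction l with
  | nil => intro acc _; simp
  | cons i l ih =>
    intro acc hlt
    have hi : i < acc.length := hlt i (by simp)
    rw [List.foldl_cons, ih _ (fun i' hi' => by
      have := hlt i' (List.mem_cons_of_mem _ hi'); split <;> simpa using this)]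
    by_cases hpi : p i
    · by_cases hij : i = j
      · subst hij
        simp [hpi, List.getD, hi]
        ring
      · simp [hpi, hij, List.getD]
    · by_cases hij : i = j
      · subst hij; simp [hpi]
      · simp [hpi, hij]

lemma pv_settrue (p : Nat → Prop) [DecidablePred p] (j : Nat) :
    ∀ (l : List Nat) (acc : List Bool), (∀ i ∈ l, i < acc.length) →
      (l.foldl (fun a i => if p i then a.set i true else a) acc).getD j false
        = (acc.getD j false || decide (p j ∧ j ∈ l)) := by
  intro l
  induction l with
  | nil => intro acc _; simp
  | cons i l ih =>
    intro acc hlt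
    have hi : i < acc.length := hlt i (by simp)
    rw [List.foldl_cons, ih _ (fun i' hi' => by
      have := hlt i' (List.mem_cons_of_mem _ hi'); split <;> simpa using this)]
    by_cases hpi : p i
    · by_cases hij : i = j
      · subst hij
        simp [hpi, List.getD, hi]
      · simp [hpi, List.getD, hij, Ne.symm hij]
    · by_cases hij : i = j
      · subst hij; simp [hpi]
      · simp [hpi, Ne.symm hij]

lemma pv_any (p : Nat → Prop) [DecidablePred p] :
    ∀ (l : List Nat) (b : Bool),
      l.foldl (fun b i => if p i then true else b) b
        = (b || l.any (fun i => decide (p i))) := by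
  intro l
  induction l with
  | nil => intro b; simp
  | cons i l ih =>
    intro b
    rw [List.foldl_cons, ih]
    by_cases hpi : p i <;> simp [hpi]

-- the first pair-state loop of A is two independent loops ("01"-branch and "10"-branch are disjoint)
lemma pv_split1 (f : List (List String)) (x : Nat) (l : List Nat) (acc : List Int × List Int) :
    l.foldl (fun (st : List Int × List Int) j =>
        if pvGet f x j = "01" then (st.1.set j (st.1.getD j 0 + 1), st.2)
        else if pvGet f x j = "10" then (st.1, st.2.set j (st.2.getD j 0 + 1))
        else st) acc
      = (l.foldl (fun a j => if pvGet f x j = "01" then a.set j (a.getD j 0 + 1) else a) acc.1,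
         l.foldl (fun a j => if pvGet f x j = "10" then a.set j (a.getD j 0 + 1) else a) acc.2) := by
  rw [show (fun (st : List Int × List Int) (j : Nat) =>
        if pvGet f x j = "01" then (st.1.set j (st.1.getD j 0 + 1), st.2)
        else if pvGet f x j = "10" then (st.1, st.2.set j (st.2.getD j 0 + 1))
        else st)
      = (fun st j => (if pvGet f x j = "01" then st.1.set j (st.1.getD j 0 + 1) else st.1,
                      if pvGet f x j = "10" then st.2.set j (st.2.getD j 0 + 1) else st.2)) from
    funext fun st => funext fun j => by
      by_cases h1 : pvGet f x j = "01"
      · simp [h1]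
      · by_cases h2 : pvGet f x j = "10" <;> simp [h1, h2]]
  obtain ⟨a, b⟩ := acc
  exact PySem.List.foldl_prod_mk
    (fun a j => if pvGet f x j = "01" then a.set j (a.getD j 0 + 1) else a)
    (fun a j => if pvGet f x j = "10" then a.set j (a.getD j 0 + 1) else a) l a b

-- the second pair-state loop of A is two independent loops
lemma pv_split2 (p : Nat → Prop) [DecidablePred p] (l : List Nat) (acc : List Bool × Bool) :
    l.foldl (fun (st : List Bool × Bool) j => if p j then (st.1.set j true, true) else st) acc
      = (l.foldl (fun a j => if p j then a.set j true else a) acc.1,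
         l.foldl (fun b j => if p j then true else b) acc.2) := by
  rw [show (fun (st : List Bool × Bool) (j : Nat) => if p j then (st.1.set j true, true) else st)
      = (fun st j => (if p j then st.1.set j true else st.1, if p j then true else st.2)) from
    funext fun st => funext fun j => by by_cases h : p j <;> simp [h]]
  obtain ⟨a, b⟩ := acc
  exact PySem.List.foldl_prod_mk
    (fun a j => if p j then a.set j true else a)
    (fun b j => if p j then true else b) l a b

lemma pv_len_outer (f : List (List String)) (v : String) (n : Nat) :
    ∀ (cubes : List Nat) (acc : List Int),
      (cubes.foldl (fun a x => (List.range n).foldl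
          (fun a2 i => if pvGet f x i = v then a2.set i (a2.getD i 0 + 1) else a2) a) acc).length
        = acc.length :=
  pv_len _ (fun a x => pv_len _ (fun a2 i => by split <;> simp) _ a)

lemma pv_outer (f : List (List String)) (v : String) (n j : Nat) :
    ∀ (cubes : List Nat) (acc : List Int), acc.length = n →
      (cubes.foldl (fun a x => (List.range n).foldl
          (fun a2 i => if pvGet f x i = v then a2.set i (a2.getD i 0 + 1) else a2) a) acc).getD j 0
        = acc.getD j 0 + (if j < n then ((cubes.countP (fun x => pvGet f x j == v)) : Int) else 0) := by
  intro cubes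
  induction cubes with
  | nil => intro acc _; simp
  | cons x cubes ih =>
    intro acc hlen
    rw [List.foldl_cons,
        ih _ (by rw [pv_len _ (fun a2 i => by split <;> simp) _ acc, hlen]),
        pv_incr (p := fun i => pvGet f x i = v) j (List.range n) acc
          (fun i hi => by rw [hlen]; exact List.mem_range.mp hi),
        List.count_range, List.countP_cons]
    by_cases hv : pvGet f x j = v <;> by_cases hj : j < n <;>
      · simp [hv, hj]
        try ring

lemma pv_getD_replicate {α : Type} (n j : Nat) (a : α) :
    (List.replicate n a).getD j a = a := by
  simp [List.getD, List.getElem?_replicate]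
  split <;> rfl

lemma pv_count_col (f : List (List String)) (v : String) (k j : Nat) :
    List.count v (List.map (fun x => pvGet f x j) (List.range k))
      = (List.range k).countP (fun x => pvGet f x j == v) := by
  rw [List.count, List.countP_map]; rfl

lemma pv_split2' (TC NC : List Int) (l : List Nat) (acc : List Bool × Bool) :
    l.foldl (fun (st : List Bool × Bool) j =>
        if TC.getD j 0 > 0 ∧ NC.getD j 0 > 0 then (st.1.set j true, true) else st) acc
      = (l.foldl (fun a j => if TC.getD j 0 > 0 ∧ NC.getD j 0 > 0 then a.set j true else a) acc.1,
         l.foldl (fun b j => if TC.getD j 0 > 0 ∧ NC.getD j 0 > 0 then true else b) acc.2) :=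
  pv_split2 _ l acc

lemma pv_len_settrue (TC NC : List Int) (l : List Nat) (acc : List Bool) :
    (l.foldl (fun a j => if TC.getD j 0 > 0 ∧ NC.getD j 0 > 0 then a.set j true else a) acc).length
      = acc.length :=
  pv_len _ (fun a i => by split <;> simp) l acc

lemma pv_settrue' (TC NC : List Int) (j : Nat) (l : List Nat) (acc : List Bool)
    (h : ∀ i ∈ l, i < acc.length) :
    (l.foldl (fun a i => if TC.getD i 0 > 0 ∧ NC.getD i 0 > 0 then a.set i true else a) acc).getD j false
      = (acc.getD j false || decide ((TC.getD j 0 > 0 ∧ NC.getD j 0 > 0) ∧ j ∈ l)) :=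
  pv_settrue _ j l acc h

lemma pv_any' (TC NC : List Int) (l : List Nat) (b : Bool) :
    l.foldl (fun b j => if TC.getD j 0 > 0 ∧ NC.getD j 0 > 0 then true else b) b
      = (b || l.any (fun j => decide (TC.getD j 0 > 0 ∧ NC.getD j 0 > 0))) :=
  pv_any _ l b

-- ===== VERDICT (by name: the statement is the Claim_ definition above) =====
theorem BinateVariable_spec : Claim_equal_BinateVariable := by
  intro f nv nc _ _
  unfold Spec_BinateVariable BinateVariable BinateVariable_alt
  simp only [pv_range0, List.foldl_map, List.map_map, Function.comp_def,
    PySem.List.pyGetD_natCast, PySem.List.pySetD_natCast, PySem.List.count_eq,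
    List.any_map, pvGet_fold]
  rw [show (fun (st : List Int × List Int) (x : Nat) =>
        List.foldl (fun (st2 : List Int × List Int) (j : Nat) =>
          if pvGet f x j = "01" then (st2.1.set j (st2.1.getD j 0 + 1), st2.2)
          else if pvGet f x j = "10" then (st2.1, st2.2.set j (st2.2.getD j 0 + 1))
          else st2) st (List.range nv.toNat))
      = (fun st x =>
          (List.foldl (fun a j => if pvGet f x j = "01" then a.set j (a.getD j 0 + 1) else a) st.1 (List.range nv.toNat),
           List.foldl (fun a j => if pvGet f x j = "10" then a.set j (a.getD j 0 + 1) else a) st.2 (List.range nv.toNat))) from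
    funext fun st => funext fun x => pv_split1 f x (List.range nv.toNat) st,
    PySem.List.foldl_prod_mk
      (f := fun (a : List Int) (x : Nat) =>
        List.foldl (fun (a2 : List Int) (j : Nat) =>
          if pvGet f x j = "01" then a2.set j (a2.getD j 0 + 1) else a2) a (List.range nv.toNat))
      (g := fun (a : List Int) (x : Nat) =>
        List.foldl (fun (a2 : List Int) (j : Nat) =>
          if pvGet f x j = "10" then a2.set j (a2.getD j 0 + 1) else a2) a (List.range nv.toNat))]
  set TC : List Int := List.foldl (fun (a : List Int) (x : Nat) =>
      List.foldl (fun (a2 : List Int) (j : Nat) =>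
        if pvGet f x j = "01" then a2.set j (a2.getD j 0 + 1) else a2) a (List.range nv.toNat))
    (List.replicate nv.toNat 0) (List.range nc.toNat) with hTCdef
  set NC : List Int := List.foldl (fun (a : List Int) (x : Nat) =>
      List.foldl (fun (a2 : List Int) (j : Nat) =>
        if pvGet f x j = "10" then a2.set j (a2.getD j 0 + 1) else a2) a (List.range nv.toNat))
    (List.replicate nv.toNat 0) (List.range nc.toNat) with hNCdef
  have hTlen : TC.length = nv.toNat := by
    rw [hTCdef, pv_len_outer, List.length_replicate]
  have hNlen : NC.length = nv.toNat := by
    rw [hNCdef, pv_len_outer, List.length_replicate]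
  have hTd : ∀ j : Nat, TC.getD j 0
      = (if j < nv.toNat then (((List.range nc.toNat).countP (fun x => pvGet f x j == "01")) : Int) else 0) := by
    intro j
    rw [hTCdef, pv_outer f "01" nv.toNat j (List.range nc.toNat) _ List.length_replicate,
        pv_getD_replicate, zero_add]
  have hNd : ∀ j : Nat, NC.getD j 0
      = (if j < nv.toNat then (((List.range nc.toNat).countP (fun x => pvGet f x j == "10")) : Int) else 0) := by
    intro j
    rw [hNCdef, pv_outer f "10" nv.toNat j (List.range nc.toNat) _ List.length_replicate,
        pv_getD_replicate, zero_add]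
  rw [pv_split2' TC NC (List.range nv.toNat) (List.replicate nv.toNat false, false)]
  simp only [Prod.mk.injEq]
  refine ⟨?_, ?_, ?_, ?_⟩
  · -- true_count
    refine List.ext_getElem (by simpa using hTlen) ?_
    intro j h1 h2
    have hj : j < nv.toNat := by simpa using h2
    rw [← List.getD_eq_getElem TC 0 h1, hTd j, if_pos hj,
        List.getElem_map, List.getElem_range, pv_count_col]
  · -- neg_count
    refine List.ext_getElem (by simpa using hNlen) ?_
    intro j h1 h2
    have hj : j < nv.toNat := by simpa using h2
    rw [← List.getD_eq_getElem NC 0 h1, hNd j, if_pos hj,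
        List.getElem_map, List.getElem_range, pv_count_col]
  · -- binate_list
    refine List.ext_getElem ?_ ?_
    · rw [pv_len_settrue]; simp
    · intro j h1 h2
      have hj : j < nv.toNat := by simpa using h2
      rw [← List.getD_eq_getElem _ false h1,
          pv_settrue' TC NC j (List.range nv.toNat) (List.replicate nv.toNat false)
            (fun i hi => by simpa using List.mem_range.mp hi),
          List.getElem_map, List.getElem_range]
      simp [List.mem_range, hj]
      rw [show TC[j]?.getD 0 = TC.getD j 0 from rfl, show NC[j]?.getD 0 = NC.getD j 0 from rfl,
          hTd j, hNd j, if_pos hj, if_pos hj,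
          pv_count_col f "01" nc.toNat j, pv_count_col f "10" nc.toNat j]
  · -- binate flag
    rw [pv_any' TC NC (List.range nv.toNat) false, Bool.false_or]
    refine PySem.List.any_congr_mem ?_
    intro j hj
    have hjn : j < nv.toNat := List.mem_range.mp hj
    rw [hTd j, hNd j, if_pos hjn, if_pos hjn,
        pv_count_col f "01" nc.toNat j, pv_count_col f "10" nc.toNat j]
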